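-- pv_equiv track=rewrite | github.com/ujcycu/elephantChess_MahJong | alg.py | matchThree
-- ===== SOURCE A (Python) =====
-- def matchThree(array): #0, 1-10; 16, 17-26
--     for i in array:
--         if i == 0:
--             for j in array:
--                 if j == 1 or j == 2:
--                     for k in array:
--                         if k == 3 or k == 4:
--                             return True #將士象
--         elif i == 5 or i == 6:
--             for j in array:
--                 if j == 7 or j == 8:
--                     for k in array:
--                         if k == 9 or k == 10:
--                             return True #車馬包
--         elif i == 16:
--             for j in array:
--                 if j == 17 or j == 18:
--                     for k in array:
--                         if k == 19 or k == 20: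
--                             return True #帥仕相
--         elif i == 21 or i == 22:
--             for j in array:
--                 if j == 23 or j == 24:
--                     for k in array:
--                         if k == 25 or k == 26:
--                             return True #俥傌炮
-- ===== SOURCE B (Python) =====
-- PATTERNS = [
--     ((0,), (1, 2), (3, 4)),        # 將士象
--     ((5, 6), (7, 8), (9, 10)),     # 車馬包
--     ((16,), (17, 18), (19, 20)),   # 帥仕相
--     ((21, 22), (23, 24), (25, 26)),# 俥傌炮
-- ]
--
-- def matchThree(array):
--     s = set(array)
--     for anchors, seconds, thirds in PATTERNS:
--         if any(x in s for x in anchors) and any(x in s for x in seconds) and any(x in s for x in thirds):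
--             return True
-- ===== Notes on version B (the rewrite author's own statement) =====
-- stated objective: simpler
-- what changed: Replaces four copies of triple-nested membership scans with a single pass building a set of distinct values plus a data table of the four (anchors, seconds, thirds) patterns checked against that set.
import Mathlib
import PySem

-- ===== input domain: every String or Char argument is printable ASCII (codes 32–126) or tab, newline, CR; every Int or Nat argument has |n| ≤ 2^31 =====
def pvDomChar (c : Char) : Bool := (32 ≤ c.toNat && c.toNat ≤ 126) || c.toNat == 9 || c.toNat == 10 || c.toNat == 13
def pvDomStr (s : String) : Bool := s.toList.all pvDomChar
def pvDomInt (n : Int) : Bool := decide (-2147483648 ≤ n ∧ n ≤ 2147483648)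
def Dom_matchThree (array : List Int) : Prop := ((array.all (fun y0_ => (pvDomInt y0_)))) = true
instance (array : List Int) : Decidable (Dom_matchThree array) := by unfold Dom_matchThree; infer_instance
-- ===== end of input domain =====

-- B replaces A's four copies of triple-nested membership scans by one distinct-value set and
-- a data table of the four (anchors, seconds, thirds) patterns, tested by membership (simpler).


-- ===== PORT A =====
-- inner 'for k in array: if kc k: return True' (falls through = no hit)
def pvLoopK (arr : List Int) (kc : Int → Bool) : Bool :=
  match arr with
  | [] => false
  | k :: rest => if kc k then true else pvLoopK rest kc

-- middle 'for j in array: if jc j: <k-loop over the full array>'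
def pvLoopJ (arr full : List Int) (jc kc : Int → Bool) : Bool :=
  match arr with
  | [] => false
  | j :: rest =>
    if jc j then
      (if pvLoopK full kc then true else pvLoopJ rest full jc kc)
    else pvLoopJ rest full jc kc

-- outer 'for i in array' with A's four branches; falling off the end = Python's implicit None
def pvLoopI (arr full : List Int) : Option Bool :=
  match arr with
  | [] => none
  | i :: rest =>
    if i == 0 then
      (if pvLoopJ full full (fun j => j == 1 || j == 2) (fun k => k == 3 || k == 4)
       then some true else pvLoopI rest full)
    else if i == 5 || i == 6 then
      (if pvLoopJ full full (fun j => j == 7 || j == 8) (fun k => k == 9 || k == 10)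
       then some true else pvLoopI rest full)
    else if i == 16 then
      (if pvLoopJ full full (fun j => j == 17 || j == 18) (fun k => k == 19 || k == 20)
       then some true else pvLoopI rest full)
    else if i == 21 || i == 22 then
      (if pvLoopJ full full (fun j => j == 23 || j == 24) (fun k => k == 25 || k == 26)
       then some true else pvLoopI rest full)
    else pvLoopI rest full

def matchThree (array : List Int) : Option Bool := pvLoopI array array

-- ===== PORT B =====
-- the PATTERNS table of Source B: (anchors, seconds, thirds) per pattern
def pvPatterns : List (List Int × List Int × List Int) :=
  [([0], [1, 2], [3, 4]),
   ([5, 6], [7, 8], [9, 10]),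
   ([16], [17, 18], [19, 20]),
   ([21, 22], [23, 24], [25, 26])]

-- Source B's loop over PATTERNS with the three any-membership tests against the set s
def pvGoPatterns (ps : List (List Int × List Int × List Int)) (s : PySem.Set Int) : Option Bool :=
  match ps with
  | [] => none
  | (anchors, seconds, thirds) :: rest =>
    if anchors.any (fun x => PySem.Set.contains s x) &&
       seconds.any (fun x => PySem.Set.contains s x) &&
       thirds.any (fun x => PySem.Set.contains s x)
    then some true else pvGoPatterns rest s

def matchThree_alt (array : List Int) : Option Bool :=
  pvGoPatterns pvPatterns (PySem.Set.ofList array)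

-- ===== PRECONDITION & SPEC =====
def Spec_matchThree (array : List Int) (out : Option Bool) : Prop := out = matchThree_alt array
instance (array : List Int) (out : Option Bool) : Decidable (Spec_matchThree array out) := by unfold Spec_matchThree; infer_instance

-- ===== CLAIM (what is proved, stated in full; the proofs are below) =====
def Claim_equal_matchThree : Prop := ∀ (array : List Int), Dom_matchThree array → Spec_matchThree array (matchThree array)

-- ===== LEMMAS AND PROOFS =====
theorem pvLoopK_eq_any (arr : List Int) (kc : Int → Bool) : pvLoopK arr kc = arr.any kc := by
  induction arr with
  | nil => rfl
  | cons k rest ih => simp only [pvLoopK, List.any_cons, ih]; cases kc k <;> simp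

theorem pvLoopJ_eq_any (arr full : List Int) (jc kc : Int → Bool) :
    pvLoopJ arr full jc kc = (arr.any jc && pvLoopK full kc) := by
  induction arr with
  | nil => rfl
  | cons j rest ih =>
    simp only [pvLoopJ, List.any_cons, ih]
    cases jc j <;> cases pvLoopK full kc <;> simp

-- A's outer loop returns `some true` iff some element triggers a branch whose inner scans hit
set_option maxHeartbeats 1000000 in
theorem pvLoopI_eq (arr full : List Int) :
    pvLoopI arr full =
      (if (arr.any (fun i => i == 0) && pvLoopJ full full (fun j => j == 1 || j == 2) (fun k => k == 3 || k == 4)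
          || arr.any (fun i => i == 5 || i == 6) && pvLoopJ full full (fun j => j == 7 || j == 8) (fun k => k == 9 || k == 10)
          || arr.any (fun i => i == 16) && pvLoopJ full full (fun j => j == 17 || j == 18) (fun k => k == 19 || k == 20)
          || arr.any (fun i => i == 21 || i == 22) && pvLoopJ full full (fun j => j == 23 || j == 24) (fun k => k == 25 || k == 26))
       then some true else none) := by
  induction arr with
  | nil => rfl
  | cons i rest ih =>
    simp only [pvLoopI, List.any_cons, ih]
    split_ifs <;> simp_all <;> aesop

theorem pv_any_or (l : List Int) (p q : Int → Bool) :
    (l.any fun x => p x || q x) = (l.any p || l.any q) := by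
  induction l with
  | nil => rfl
  | cons x xs ih => simp only [List.any_cons, ih]; cases p x <;> cases q x <;> simp

theorem pvContains_ofList (xs : List Int) (x : Int) :
    PySem.Set.contains (PySem.Set.ofList xs) x = xs.any (fun y => y == x) := by
  rw [Bool.eq_iff_iff]
  simp [PySem.Set.mem_ofList, List.any_eq_true, beq_iff_eq]

-- one big disjunction guarding `some true` = the four-way if chain, as a pure Bool tautology
theorem pv_if_chain (P1 Q1 R1 P2 Q2 R2 P3 Q3 R3 P4 Q4 R4 : Bool) :
    (if (P1 && (Q1 && R1) || P2 && (Q2 && R2) || P3 && (Q3 && R3) || P4 && (Q4 && R4)) = true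
     then (some true : Option Bool) else none)
    = if ((P1 && Q1) && R1) = true then some true
      else if ((P2 && Q2) && R2) = true then some true
      else if ((P3 && Q3) && R3) = true then some true
      else if ((P4 && Q4) && R4) = true then some true
      else none := by revert P1 Q1 R1 P2 Q2 R2 P3 Q3 R3 P4 Q4 R4; decide

theorem matchThree_eq_alt (array : List Int) : matchThree array = matchThree_alt array := by
  rw [matchThree, pvLoopI_eq]
  simp only [matchThree_alt, pvGoPatterns, pvPatterns, List.any_cons, List.any_nil,
    pvContains_ofList, Bool.or_false, pvLoopJ_eq_any, pvLoopK_eq_any, ← pv_any_or]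
  exact pv_if_chain _ _ _ _ _ _ _ _ _ _ _ _

-- ===== VERDICT (by name: the statement is the Claim_ definition above) =====
theorem matchThree_spec : Claim_equal_matchThree := by
  intro array _
  exact matchThree_eq_alt array
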